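-- pv_equiv track=rewrite | github.com/bplaut/RAMbrandt | util.py | closest_val_in_dict
-- ===== SOURCE A (Python) =====
-- def closest_val_in_dict(d, key):
--     (lower, upper) = (key, key)
--     while (lower not in d) and (upper not in d):
--         lower -= 1
--         upper += 1
--     if lower in d:
--         return lower
--     else:
--         return upper
-- ===== SOURCE B (Python) =====
-- def closest_val_in_dict(d, key):
--     best = None
--     for k in d:
--         if (best is None or abs(k - key) < abs(best - key)
--                 or (abs(k - key) == abs(best - key) and k < best)):
--             best = k
--     return best
-- ===== Notes on version B (the rewrite author's own statement) =====
-- stated objective: alternative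
-- what changed: A expands a search radius around key, testing membership of key-t and key+t until it hits a key; B instead makes one linear pass over the dict's keys keeping the key with minimal (|k-key|, k), so its cost depends on the number of keys rather than on the distance to the nearest key.
import Mathlib
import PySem

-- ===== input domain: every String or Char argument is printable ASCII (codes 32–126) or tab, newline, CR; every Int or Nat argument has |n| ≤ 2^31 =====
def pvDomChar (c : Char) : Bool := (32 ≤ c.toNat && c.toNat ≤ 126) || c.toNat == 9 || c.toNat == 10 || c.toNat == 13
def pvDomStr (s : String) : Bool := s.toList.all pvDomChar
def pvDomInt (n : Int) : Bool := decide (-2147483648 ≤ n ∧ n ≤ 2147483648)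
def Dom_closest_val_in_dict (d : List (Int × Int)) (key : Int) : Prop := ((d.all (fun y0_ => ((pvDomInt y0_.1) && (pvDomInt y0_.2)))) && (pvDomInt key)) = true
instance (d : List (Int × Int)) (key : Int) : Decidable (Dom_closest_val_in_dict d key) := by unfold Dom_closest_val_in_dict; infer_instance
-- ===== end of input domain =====

-- B replaces A's expanding search around `key` (cost = distance to the nearest key)
-- with a single pass over the dict's keys keeping the (|k-key|, k)-minimal key.

-- ===== PORT A =====
-- Fuel-driven transliteration of A's while loop; fuel = (max key distance) + 1 is
-- enough for the loop to hit a key whenever d is nonempty (Pre_ below); 0 is a dead default.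
def pvMaxDist (keys : List Int) (key : Int) : Nat :=
  keys.foldl (fun m k => max m (k - key).natAbs) 0

def pvGoA (keys : List Int) (lower upper : Int) : Nat → Int
  | 0 => 0
  | n + 1 =>
    if !keys.contains lower && !keys.contains upper then
      pvGoA keys (lower - 1) (upper + 1) n
    else if keys.contains lower then lower else upper

def closest_val_in_dict (d : List (Int × Int)) (key : Int) : Int :=
  pvGoA (d.map Prod.fst) key key (pvMaxDist (d.map Prod.fst) key + 1)

-- ===== PORT B =====
-- one step of B's loop: keep the better of `best` and the next key k
def pvStep (key : Int) (best : Option Int) (k : Int) : Option Int :=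
  match best with
  | none => some k
  | some b =>
    if (k - key).natAbs < (b - key).natAbs ∨
       ((k - key).natAbs = (b - key).natAbs ∧ k < b) then some k else some b

def closest_val_in_dict_alt (d : List (Int × Int)) (key : Int) : Int :=
  match (d.map Prod.fst).foldl (pvStep key) none with
  | some b => b
  | none => 0   -- unreachable under Pre_ (B's Python returns None on an empty dict)

-- ===== PRECONDITION & SPEC =====
-- On an empty dict A's loop never terminates, so those inputs are excluded.
def Pre_closest_val_in_dict (d : List (Int × Int)) (key : Int) : Prop := d ≠ []
instance (d : List (Int × Int)) (key : Int) : Decidable (Pre_closest_val_in_dict d key) := by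
  unfold Pre_closest_val_in_dict; infer_instance

def pvWitness_closest_val_in_dict : (List (Int × Int)) × Int := ([(3, 7), (5, 1)], 4)

def Spec_closest_val_in_dict (d : List (Int × Int)) (key : Int) (out : Int) : Prop := out = closest_val_in_dict_alt d key
instance (d : List (Int × Int)) (key : Int) (out : Int) : Decidable (Spec_closest_val_in_dict d key out) := by unfold Spec_closest_val_in_dict; infer_instance

-- ===== CLAIM (what is proved, stated in full; the proofs are below) =====
def Claim_equal_closest_val_in_dict : Prop := ∀ (d : List (Int × Int)) (key : Int), Dom_closest_val_in_dict d key → Pre_closest_val_in_dict d key → Spec_closest_val_in_dict d key (closest_val_in_dict d key)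

-- ===== LEMMAS AND PROOFS =====

-- B's preference order: b is at least as good as k
def pvLe (key b k : Int) : Prop :=
  (b - key).natAbs < (k - key).natAbs ∨
  ((b - key).natAbs = (k - key).natAbs ∧ b ≤ k)

theorem pvLe_trans (key a b c : Int) (h1 : pvLe key a b) (h2 : pvLe key b c) : pvLe key a c := by
  unfold pvLe at *; omega

-- characterization of B's fold from a non-empty accumulator
theorem foldB_char (key : Int) (keys : List Int) : ∀ b0 : Int,
    ∃ b, keys.foldl (pvStep key) (some b0) = some b ∧
      (b = b0 ∨ b ∈ keys) ∧ pvLe key b b0 ∧ ∀ k ∈ keys, pvLe key b k := by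
  induction keys with
  | nil => intro b0; exact ⟨b0, rfl, Or.inl rfl, Or.inr ⟨rfl, le_refl _⟩, by simp⟩
  | cons a l ih =>
    intro b0
    simp only [List.foldl_cons]
    by_cases h : (a - key).natAbs < (b0 - key).natAbs ∨
        ((a - key).natAbs = (b0 - key).natAbs ∧ a < b0)
    · obtain ⟨b, hfold, hmem, hle, hall⟩ := ih a
      refine ⟨b, ?_, ?_, ?_, ?_⟩
      · simpa [pvStep, h] using hfold
      · rcases hmem with h' | h' <;> simp [h']
      · exact pvLe_trans key b a b0 hle (by unfold pvLe; omega)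
      · intro k hk
        rcases (List.mem_cons).1 hk with h' | h'
        · exact h' ▸ hle
        · exact hall k h'
    · obtain ⟨b, hfold, hmem, hle, hall⟩ := ih b0
      refine ⟨b, ?_, ?_, hle, ?_⟩
      · simpa [pvStep, h] using hfold
      · rcases hmem with h' | h' <;> simp [h']
      · intro k hk
        rcases (List.mem_cons).1 hk with h' | h'
        · exact h' ▸ pvLe_trans key b b0 a hle (by unfold pvLe; omega)
        · exact hall k h'

-- every key's distance is bounded by pvMaxDist
theorem foldl_max_le (key : Int) (l : List Int) : ∀ i : Nat,
    i ≤ l.foldl (fun m k => max m (k - key).natAbs) i := by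
  induction l with
  | nil => intro i; simp
  | cons a l ih =>
    intro i
    exact le_trans (le_max_left i _) (ih _)

theorem mem_le_maxDist (key : Int) (l : List Int) : ∀ (i : Nat), ∀ k ∈ l,
    (k - key).natAbs ≤ l.foldl (fun m x => max m (x - key).natAbs) i := by
  induction l with
  | nil => simp
  | cons a l ih =>
    intro i k hk
    rcases (List.mem_cons).1 hk with h' | h'
    · subst h'
      exact le_trans (le_max_right i _) (foldl_max_le key l _)
    · exact ih _ k h'

-- A's loop, characterized: if M is the minimal distance it returns key-M when present, else key+M
theorem goA_char (keys : List Int) (key : Int) (M : Nat)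
    (Hmem : (key - (M : Int)) ∈ keys ∨ (key + (M : Int)) ∈ keys)
    (Hmin : ∀ k ∈ keys, M ≤ (k - key).natAbs) :
    ∀ n t, t ≤ M → M - t < n →
      pvGoA keys (key - (t : Int)) (key + (t : Int)) n =
        (if keys.contains (key - (M : Int)) then key - (M : Int) else key + (M : Int)) := by
  intro n
  induction n with
  | zero => intro t _ h; omega
  | succ n ih =>
    intro t ht hfuel
    by_cases hEq : t = M
    · subst hEq
      unfold pvGoA
      by_cases hlo : (key - (t : Int)) ∈ keys
      · simp [hlo]
      · have hhi : (key + (t : Int)) ∈ keys := by tauto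
        simp [hlo, hhi]
    · have htlt : t < M := lt_of_le_of_ne ht hEq
      have hlo : ¬ (key - (t : Int)) ∈ keys := by
        intro h
        have := Hmin _ h
        omega
      have hhi : ¬ (key + (t : Int)) ∈ keys := by
        intro h
        have := Hmin _ h
        omega
      have hlo' : keys.contains (key - (t : Int)) = false := by
        simpa using hlo
      have hhi' : keys.contains (key + (t : Int)) = false := by
        simpa using hhi
      unfold pvGoA
      simp only [hlo', hhi', Bool.not_false, Bool.and_self, if_pos]
      have e1 : key - (t : Int) - 1 = key - ((t + 1 : Nat) : Int) := by push_cast; ring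
      have e2 : key + (t : Int) + 1 = key + ((t + 1 : Nat) : Int) := by push_cast; ring
      rw [e1, e2]
      exact ih (t + 1) (by omega) (by omega)

-- ===== VERDICT (by name: the statement is the Claim_ definition above) =====
theorem closest_val_in_dict_spec : Claim_equal_closest_val_in_dict := by
  intro d key _ hpre
  unfold Spec_closest_val_in_dict closest_val_in_dict closest_val_in_dict_alt
  set keys := d.map Prod.fst with hkeys
  obtain ⟨k0, rest, hk⟩ : ∃ k0 rest, keys = k0 :: rest := by
    cases hd : d with
    | nil => exact absurd hd hpre
    | cons p l => exact ⟨p.1, l.map Prod.fst, by simp [hkeys, hd]⟩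
  obtain ⟨b, hfold, hmem, hle, hall⟩ := foldB_char key rest k0
  have hbmem : b ∈ keys := by
    rw [hk]; rcases hmem with h | h <;> simp [h]
  have hball : ∀ k ∈ keys, pvLe key b k := by
    intro k hkm
    rw [hk] at hkm
    rcases (List.mem_cons).1 hkm with h | h
    · exact h ▸ hle
    · exact hall k h
  set M := (b - key).natAbs with hM
  have hbform : b = key - (M : Int) ∨ b = key + (M : Int) := by omega
  have Hmin : ∀ k ∈ keys, M ≤ (k - key).natAbs := by
    intro k hkm
    have := hball k hkm
    unfold pvLe at this; omega
  have Hmem : (key - (M : Int)) ∈ keys ∨ (key + (M : Int)) ∈ keys := by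
    rcases hbform with h | h
    · exact Or.inl (h ▸ hbmem)
    · exact Or.inr (h ▸ hbmem)
  have hMle : M ≤ pvMaxDist keys key := by
    have := mem_le_maxDist key keys 0 b hbmem
    simpa [pvMaxDist, hM] using this
  have hA := goA_char keys key M Hmem Hmin (pvMaxDist keys key + 1) 0 (by omega) (by omega)
  simp only [Nat.cast_zero, sub_zero, add_zero] at hA
  rw [hA]
  have hfold' : keys.foldl (pvStep key) none = some b := by
    rw [hk]
    simpa [pvStep] using hfold
  rw [hfold']
  rcases hbform with h | h
  · have hmemlo : (key - (M : Int)) ∈ keys := h ▸ hbmem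
    simp [hmemlo, h]
  · by_cases hmemlo : (key - (M : Int)) ∈ keys
    · have := hball _ hmemlo
      unfold pvLe at this
      have hM0 : (M : Int) = 0 := by omega
      simp [h, hM0]
    · simp [hmemlo, h]
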